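-- pv_equiv track=rewrite | github.com/leaningtech/cheerp-test | helpers/determinism_wrapper_compile_only.py | summarize_manifest_diff
-- ===== SOURCE A (Python) =====
-- def summarize_manifest_diff(base: dict[str, str], other: dict[str, str], limit: int = 10) -> str:
--     msgs: list[str] = []
--
--     base_keys = set(base.keys())
--     other_keys = set(other.keys())
--
--     missing = sorted(base_keys - other_keys)
--     extra = sorted(other_keys - base_keys)
--     changed = sorted(k for k in (base_keys & other_keys) if base[k] != other[k])
--
--     if missing:
--         msgs.append("missing: " + ", ".join(missing[:limit]))
--     if extra:
--         msgs.append("extra: " + ", ".join(extra[:limit]))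
--     if changed:
--         msgs.append("changed: " + ", ".join(changed[:limit]))
--
--     if not msgs:
--         return "no diff"
--     return " | ".join(msgs)
-- ===== SOURCE B (Python) =====
-- def summarize_manifest_diff(base: dict[str, str], other: dict[str, str], limit: int = 10) -> str:
--     # One sorted pass over the union of keys, classifying each key once.
--     missing: list[str] = []
--     extra: list[str] = []
--     changed: list[str] = []
--     for k in sorted(set(base) | set(other)):
--         if k not in other:
--             missing.append(k)
--         elif k not in base:
--             extra.append(k)
--         elif base[k] != other[k]:
--             changed.append(k)
--     parts: list[str] = []
--     for label, keys in (("missing: ", missing), ("extra: ", extra), ("changed: ", changed)):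
--         if keys:
--             parts.append(label + ", ".join(keys[:limit]))
--     return " | ".join(parts) if parts else "no diff"
-- ===== Notes on version B (the rewrite author's own statement) =====
-- stated objective: alternative
-- what changed: A computes three separate set operations (base-other, other-base, intersection filtered by value inequality) and sorts each result; B sorts the union of the two key sets once and classifies each key in a single pass into missing/extra/changed, which come out already sorted.
import Mathlib
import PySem

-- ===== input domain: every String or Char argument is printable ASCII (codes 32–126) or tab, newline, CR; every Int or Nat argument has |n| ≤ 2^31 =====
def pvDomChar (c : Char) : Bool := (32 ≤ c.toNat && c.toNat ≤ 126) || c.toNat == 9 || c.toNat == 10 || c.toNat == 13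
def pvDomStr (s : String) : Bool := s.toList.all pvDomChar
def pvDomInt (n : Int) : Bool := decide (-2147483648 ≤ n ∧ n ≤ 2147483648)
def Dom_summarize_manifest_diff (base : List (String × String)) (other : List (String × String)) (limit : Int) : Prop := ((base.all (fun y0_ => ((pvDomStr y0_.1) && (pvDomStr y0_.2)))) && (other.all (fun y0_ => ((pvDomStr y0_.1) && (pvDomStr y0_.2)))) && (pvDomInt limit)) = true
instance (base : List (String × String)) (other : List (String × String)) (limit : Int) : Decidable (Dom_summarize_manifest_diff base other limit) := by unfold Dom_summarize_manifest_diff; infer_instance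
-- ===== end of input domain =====

-- B replaces A's three independent set-difference/intersection traversals by one sorted pass
-- over the union of keys that classifies each key once (objective: alternative decomposition).

-- ===== PORT A =====
def summarize_manifest_diff (base : List (String × String)) (other : List (String × String)) (limit : Int) : String :=
  let b := PySem.Dict.ofList base
  let o := PySem.Dict.ofList other
  let base_keys : PySem.Set String := PySem.Set.ofList b.keys
  let other_keys : PySem.Set String := PySem.Set.ofList o.keys
  let missing := PySem.List.sorted (PySem.Set.diff base_keys other_keys) (fun x => x) false
  let extra := PySem.List.sorted (PySem.Set.diff other_keys base_keys) (fun x => x) false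
  let changed := PySem.List.sorted ((PySem.Set.inter base_keys other_keys).filter
      (fun k => b.getD k "" != o.getD k "")) (fun x => x) false
  let msgs : List String := []
  let msgs := if missing ≠ [] then msgs ++ ["missing: " ++ PySem.Str.join ", " (PySem.List.slice missing none (some limit))] else msgs
  let msgs := if extra ≠ [] then msgs ++ ["extra: " ++ PySem.Str.join ", " (PySem.List.slice extra none (some limit))] else msgs
  let msgs := if changed ≠ [] then msgs ++ ["changed: " ++ PySem.Str.join ", " (PySem.List.slice changed none (some limit))] else msgs
  if msgs = [] then "no diff" else PySem.Str.join " | " msgs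

-- ===== PORT B =====
def summarize_manifest_diff_alt (base : List (String × String)) (other : List (String × String)) (limit : Int) : String :=
  let b := PySem.Dict.ofList base
  let o := PySem.Dict.ofList other
  let allk := PySem.List.sorted (PySem.Set.union (PySem.Set.ofList b.keys) (PySem.Set.ofList o.keys)) (fun x => x) false
  let t := allk.foldl (fun (t : List String × List String × List String) k =>
      if !(o.contains k) then (t.1 ++ [k], t.2.1, t.2.2)
      else if !(b.contains k) then (t.1, t.2.1 ++ [k], t.2.2)
      else if b.getD k "" != o.getD k "" then (t.1, t.2.1, t.2.2 ++ [k])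
      else t) (([], [], []) : List String × List String × List String)
  let parts := [("missing: ", t.1), ("extra: ", t.2.1), ("changed: ", t.2.2)].foldl
      (fun ps lp => if lp.2 ≠ ([] : List String) then ps ++ [lp.1 ++ PySem.Str.join ", " (PySem.List.slice lp.2 none (some limit))] else ps)
      ([] : List String)
  if parts = [] then "no diff" else PySem.Str.join " | " parts

-- ===== PRECONDITION & SPEC =====
def Spec_summarize_manifest_diff (base : List (String × String)) (other : List (String × String)) (limit : Int) (out : String) : Prop := out = summarize_manifest_diff_alt base other limit
instance (base : List (String × String)) (other : List (String × String)) (limit : Int) (out : String) : Decidable (Spec_summarize_manifest_diff base other limit out) := by unfold Spec_summarize_manifest_diff; infer_instance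

-- ===== CLAIM (what is proved, stated in full; the proofs are below) =====
def Claim_equal_summarize_manifest_diff : Prop := ∀ (base : List (String × String)) (other : List (String × String)) (limit : Int), Dom_summarize_manifest_diff base other limit → Spec_summarize_manifest_diff base other limit (summarize_manifest_diff base other limit)

-- ===== LEMMAS AND PROOFS =====

-- B's single classifying fold is the three filters of the traversed list.
lemma pv_classify (b o : PySem.Dict String String) (l : List String)
    (x y z : List String) :
    l.foldl (fun (t : List String × List String × List String) k =>
      if !(o.contains k) then (t.1 ++ [k], t.2.1, t.2.2)
      else if !(b.contains k) then (t.1, t.2.1 ++ [k], t.2.2)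
      else if b.getD k "" != o.getD k "" then (t.1, t.2.1, t.2.2 ++ [k])
      else t) (x, y, z)
    = (x ++ l.filter (fun k => !(o.contains k)),
       y ++ l.filter (fun k => o.contains k && !(b.contains k)),
       z ++ l.filter (fun k => o.contains k && b.contains k && (b.getD k "" != o.getD k ""))) := by
  induction l generalizing x y z with
  | nil => simp
  | cons k l ih =>
      rw [List.foldl_cons]
      cases ho : o.contains k
      · simp only [Bool.not_false, reduceIte]
        rw [ih]
        simp [ho]
      · cases hb : b.contains k
        · simp only [Bool.not_true, Bool.not_false, reduceIte]
          rw [ih]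
          simp [ho, hb]
        · cases hq : (b.getD k "" != o.getD k "")
          · simp only [Bool.not_true]
            rw [ih]
            simp [ho, hb, hq]
          · simp only [Bool.not_true, reduceIte]
            rw [ih]
            simp [ho, hb, hq]

-- sorted of a subset w of u equals the corresponding filter of sorted u.
lemma pv_sorted_filter (u : List String) (hu : u.Nodup) (p : String → Bool)
    (w : List String) (hw : w.Nodup)
    (hmem : ∀ x, x ∈ w ↔ x ∈ u ∧ p x = true) :
    PySem.List.sorted w (fun x => x) false
      = (PySem.List.sorted u (fun x => x) false).filter p := by
  set su := PySem.List.sorted u (fun x => x) false with hsu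
  have hperm_su : su.Perm u := PySem.List.sorted_perm u _ false
  have hnd_su : su.Nodup := hperm_su.nodup_iff.mpr hu
  have hle : su.Pairwise (fun a b => a ≤ b) := PySem.List.sorted_pairwise u _
  have hlt : su.Pairwise (fun a b => a < b) := by
    have := hle.and hnd_su
    exact this.imp (fun h => lt_of_le_of_ne h.1 h.2)
  have hltf : (su.filter p).Pairwise (fun a b => a < b) := hlt.filter p
  have hndf : (su.filter p).Nodup := hnd_su.filter p
  have hpermf : (su.filter p).Perm w := by
    refine (List.perm_ext_iff_of_nodup hndf hw).mpr ?_
    intro x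
    rw [List.mem_filter, hmem, hperm_su.mem_iff]
  exact PySem.List.sorted_eq_of_perm_of_pairwise_lt w (su.filter p) (fun x => x) hpermf hltf

-- ===== VERDICT (by name: the statement is the Claim_ definition above) =====
theorem summarize_manifest_diff_spec : Claim_equal_summarize_manifest_diff := by
  intro base other limit _
  unfold Spec_summarize_manifest_diff summarize_manifest_diff summarize_manifest_diff_alt
  set b := PySem.Dict.ofList base
  set o := PySem.Dict.ofList other
  set bk : PySem.Set String := PySem.Set.ofList b.keys with hbk
  set ok : PySem.Set String := PySem.Set.ofList o.keys with hok
  have hbknd : bk.Nodup := PySem.Set.nodup_ofList _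
  have hoknd : ok.Nodup := PySem.Set.nodup_ofList _
  have hund : (PySem.Set.union bk ok).Nodup := PySem.Set.nodup_union bk ok hbknd
  have hcb : ∀ x, b.contains x = true ↔ x ∈ bk := by
    intro x
    rw [PySem.Dict.contains_iff_mem_keys, hbk, PySem.Set.mem_ofList]
  have hco : ∀ x, o.contains x = true ↔ x ∈ ok := by
    intro x
    rw [PySem.Dict.contains_iff_mem_keys, hok, PySem.Set.mem_ofList]
  have hmiss := pv_sorted_filter (PySem.Set.union bk ok) hund
      (fun k => !(o.contains k)) (PySem.Set.diff bk ok) (PySem.Set.nodup_diff bk ok hbknd)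
      (by intro x
          rw [PySem.Set.mem_diff, PySem.Set.mem_union]
          simp only [Bool.not_eq_eq_eq_not, Bool.not_true, ← Bool.not_eq_true, hco]
          tauto)
  have hextra := pv_sorted_filter (PySem.Set.union bk ok) hund
      (fun k => o.contains k && !(b.contains k)) (PySem.Set.diff ok bk) (PySem.Set.nodup_diff ok bk hoknd)
      (by intro x
          rw [PySem.Set.mem_diff, PySem.Set.mem_union]
          simp only [Bool.and_eq_true, Bool.not_eq_eq_eq_not, Bool.not_true, ← Bool.not_eq_true,
            hco, hcb]
          tauto)
  have hchanged := pv_sorted_filter (PySem.Set.union bk ok) hund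
      (fun k => o.contains k && b.contains k && (b.getD k "" != o.getD k ""))
      ((PySem.Set.inter bk ok).filter (fun k => b.getD k "" != o.getD k ""))
      ((PySem.Set.nodup_inter bk ok hbknd).filter _)
      (by intro x
          rw [List.mem_filter, PySem.Set.mem_inter, PySem.Set.mem_union]
          simp only [Bool.and_eq_true, hco, hcb]
          tauto)
  simp only [pv_classify, List.nil_append, List.foldl_cons, List.foldl_nil]
  rw [hmiss, hextra, hchanged]
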